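-- pv_equiv track=rewrite | github.com/Gulin7/university-projects | Fundamentals of programming/Assignments/a4erik/main.py | partial_sol
-- ===== SOURCE A (Python) =====
-- def partial_sol(lst):
--     length = len(lst)
--     for ind in range(length):
--         for ind2 in range(ind + 1, length):
--             if lst[ind] == lst[ind2]:
--                 return False
--     for ind in range(0, length - 1):
--         if abs(lst[ind] - lst[ind + 1]) == 1:
--             return False
--     if len(lst) < 4:
--         return True
--     one_between = [0] * length
--     for ind in range(length - 2):
--         if abs(lst[ind] - lst[ind + 2]) == 1:
--             one_between[ind] = 1
--             one_between[ind + 2] = 1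
--     two_between = [0] * length
--     for ind in range(length - 3):
--         if abs(lst[ind] - lst[ind + 3]) == 1:
--             two_between[ind] = 1
--             two_between[ind + 2] = 1
--     for ind in range(length):
--         if two_between[ind] == 0 and one_between[ind] == 0:
--             return False
--
--     return True
-- ===== SOURCE B (Python) =====
-- def partial_sol(lst):
--     n = len(lst)
--     if len(set(lst)) != n:
--         return False
--     if any(abs(lst[i] - lst[i + 1]) == 1 for i in range(n - 1)):
--         return False
--     if n < 4:
--         return True
--
--     def covered(i):
--         return ((i + 2 < n and abs(lst[i] - lst[i + 2]) == 1)
--                 or (i >= 2 and abs(lst[i - 2] - lst[i]) == 1)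
--                 or (i + 3 < n and abs(lst[i] - lst[i + 3]) == 1)
--                 or (i >= 3 and abs(lst[i - 3] - lst[i]) == 1))
--
--     return all(covered(i) for i in range(n))
-- ===== Notes on version B (the rewrite author's own statement) =====
-- stated objective: faster
-- what changed: Replaces the nested-loop duplicate scan with a set-size check and replaces the one_between/two_between mark tables (two marking passes plus a final scan) with a single pass that tests each index's coverage on the fly from its four possible partners at distance 2 or 3.
-- intended difference: On duplicate-free lists of length >= 4 with no adjacent difference of 1 where the verdict hinges on distance-3 pairs: when |lst[j]-lst[j+3]|==1, A credits indices j and j+2 (an off-by-one; j+2 is not an endpoint of the pair) while B credits the actual endpoints j and j+3, so A can answer True/False where B answers the opposite; B's value is the intended one since the pair's endpoints are what the pair covers. — e.g. on partial_sol([0, 2, 4, 1]): A returns true, B returns false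
import Mathlib
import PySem

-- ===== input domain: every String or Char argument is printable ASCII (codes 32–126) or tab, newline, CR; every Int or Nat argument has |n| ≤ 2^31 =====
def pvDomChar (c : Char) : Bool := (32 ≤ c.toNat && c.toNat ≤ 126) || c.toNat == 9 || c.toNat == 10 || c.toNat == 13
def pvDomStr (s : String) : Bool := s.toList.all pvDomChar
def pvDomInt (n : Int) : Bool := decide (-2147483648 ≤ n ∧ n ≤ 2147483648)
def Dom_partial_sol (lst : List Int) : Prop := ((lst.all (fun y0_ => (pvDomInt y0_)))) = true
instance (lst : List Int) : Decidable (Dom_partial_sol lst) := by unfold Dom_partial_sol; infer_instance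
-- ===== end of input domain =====

-- B replaces A's nested duplicate scan by a set-size check and A's mark tables by a single
-- per-index coverage pass (objective: faster); B intentionally credits the true endpoints
-- j and j+3 of a distance-3 pair where A credits j and j+2 (see D_partial_sol).

-- ===== PORT A =====
-- literal transliteration of A: nested duplicate loop, adjacent loop, then the
-- one_between/two_between mark tables and a final scan.
def partial_sol (lst : List Int) : Bool :=
  let length := lst.length
  if (List.range length).any (fun ind =>
      (List.range' (ind + 1) (length - (ind + 1))).any (fun ind2 =>
        lst.getD ind 0 == lst.getD ind2 0)) then false
  else if (List.range (length - 1)).any (fun ind =>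
      |lst.getD ind 0 - lst.getD (ind + 1) 0| == 1) then false
  else if length < 4 then true
  else
    let one_between := (List.range (length - 2)).foldl (fun ob ind =>
        if |lst.getD ind 0 - lst.getD (ind + 2) 0| == 1 then
          (ob.set ind 1).set (ind + 2) 1 else ob) (List.replicate length (0 : Int))
    let two_between := (List.range (length - 3)).foldl (fun tb ind =>
        if |lst.getD ind 0 - lst.getD (ind + 3) 0| == 1 then
          (tb.set ind 1).set (ind + 2) 1 else tb) (List.replicate length (0 : Int))
    if (List.range length).any (fun ind =>
        two_between.getD ind 0 == 0 && one_between.getD ind 0 == 0) then false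
    else true

-- ===== PORT B =====
-- helper of B: index i is covered iff it is an endpoint of a diff-1 pair at distance 2 or 3
def pvCovered (lst : List Int) (n i : Nat) : Bool :=
  (decide (i + 2 < n) && (|lst.getD i 0 - lst.getD (i + 2) 0| == 1))
  || (decide (2 ≤ i) && (|lst.getD (i - 2) 0 - lst.getD i 0| == 1))
  || (decide (i + 3 < n) && (|lst.getD i 0 - lst.getD (i + 3) 0| == 1))
  || (decide (3 ≤ i) && (|lst.getD (i - 3) 0 - lst.getD i 0| == 1))

def partial_sol_alt (lst : List Int) : Bool :=
  let n := lst.length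
  if (PySem.Set.ofList lst).length != n then false
  else if (List.range (n - 1)).any (fun i =>
      |lst.getD i 0 - lst.getD (i + 1) 0| == 1) then false
  else if n < 4 then true
  else (List.range n).all (fun i => pvCovered lst n i)

-- ===== PRECONDITION & SPEC =====
-- On duplicate-free lists of length ≥ 4 with no adjacent difference of 1 whose verdict hinges
-- on distance-3 pairs: when |lst[j]-lst[j+3]| = 1, A credits indices j and j+2 (an off-by-one;
-- j+2 is not an endpoint of the pair) while B credits the endpoints j and j+3, so their answers
-- differ there; B's value is the intended one since a pair covers exactly its endpoints.
-- coverage of all indices by diff-1 pairs at distance d ∈ {2,3}: a pair credits its left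
-- endpoint j and, when fix = true, its right endpoint j + d (the intended rule); when
-- fix = false it credits j + 2 regardless of d (A's off-by-one rule)
abbrev pvCovAll (lst : List Int) (fix : Bool) : Prop :=
  ∀ i < lst.length, ∃ j < lst.length, ∃ d < 4, 2 ≤ d ∧ j + d < lst.length ∧
    |lst.getD j 0 - lst.getD (j + d) 0| = 1 ∧ (i = j ∨ i = j + (if fix then d else 2))

def D_partial_sol (lst : List Int) : Prop :=
  lst.Nodup ∧
  (∀ i < lst.length - 1, |lst.getD i 0 - lst.getD (i + 1) 0| ≠ 1) ∧
  4 ≤ lst.length ∧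
  ¬ (pvCovAll lst false ↔ pvCovAll lst true)
instance (lst : List Int) : Decidable (D_partial_sol lst) := by unfold D_partial_sol; infer_instance

def Spec_partial_sol (lst : List Int) (out : Bool) : Prop := ¬ D_partial_sol lst → out = partial_sol_alt lst
instance (lst : List Int) (out : Bool) : Decidable (Spec_partial_sol lst out) := by unfold Spec_partial_sol; infer_instance

def pvDiffWitness_partial_sol : List Int := [0, 2, 4, 1]
def pvDiffWitnessOut_partial_sol : Bool × Bool := (true, false)

-- ===== CLAIM (what is proved, stated in full; the proofs are below) =====
def Claim_unchanged_partial_sol : Prop := ∀ (lst : List Int), Dom_partial_sol lst → Spec_partial_sol lst (partial_sol lst)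
def Claim_changed_partial_sol : Prop := Dom_partial_sol (pvDiffWitness_partial_sol) ∧ D_partial_sol (pvDiffWitness_partial_sol) ∧ partial_sol (pvDiffWitness_partial_sol) = pvDiffWitnessOut_partial_sol.1 ∧ partial_sol_alt (pvDiffWitness_partial_sol) = pvDiffWitnessOut_partial_sol.2 ∧ pvDiffWitnessOut_partial_sol.1 ≠ pvDiffWitnessOut_partial_sol.2
def Claim_exact_partial_sol : Prop := ∀ (lst : List Int), Dom_partial_sol lst → D_partial_sol lst → partial_sol lst ≠ partial_sol_alt lst

-- ===== LEMMAS AND PROOFS =====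

-- proof-side names for the two coverage notions that D_partial_sol states inline
abbrev pvECovA (lst : List Int) (i : Nat) : Prop :=
  (∃ j < lst.length, j + 2 < lst.length ∧
      |lst.getD j 0 - lst.getD (j + 2) 0| = 1 ∧ (i = j ∨ i = j + 2)) ∨
  (∃ j < lst.length, j + 3 < lst.length ∧
      |lst.getD j 0 - lst.getD (j + 3) 0| = 1 ∧ (i = j ∨ i = j + 2))

abbrev pvECovB (lst : List Int) (i : Nat) : Prop :=
  (∃ j < lst.length, j + 2 < lst.length ∧
      |lst.getD j 0 - lst.getD (j + 2) 0| = 1 ∧ (i = j ∨ i = j + 2)) ∨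
  (∃ j < lst.length, j + 3 < lst.length ∧
      |lst.getD j 0 - lst.getD (j + 3) 0| = 1 ∧ (i = j ∨ i = j + 3))

theorem covAll_false (lst : List Int) :
    pvCovAll lst false ↔ ∀ i < lst.length, pvECovA lst i := by
  constructor
  · intro h i hi
    obtain ⟨j, hj, d, hd4, hd2, hjd, hdiff, hij⟩ := h i hi
    simp only [if_neg (Bool.false_ne_true)] at hij
    interval_cases d
    · exact Or.inl ⟨j, hj, hjd, hdiff, hij⟩
    · exact Or.inr ⟨j, hj, hjd, hdiff, hij⟩
  · intro h i hi
    rcases h i hi with ⟨j, hj, hjd, hdiff, hij⟩ | ⟨j, hj, hjd, hdiff, hij⟩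
    · exact ⟨j, hj, 2, by omega, by omega, hjd, hdiff, by simpa using hij⟩
    · exact ⟨j, hj, 3, by omega, by omega, hjd, hdiff, by simpa using hij⟩

theorem covAll_true (lst : List Int) :
    pvCovAll lst true ↔ ∀ i < lst.length, pvECovB lst i := by
  constructor
  · intro h i hi
    obtain ⟨j, hj, d, hd4, hd2, hjd, hdiff, hij⟩ := h i hi
    interval_cases d
    · exact Or.inl ⟨j, hj, hjd, hdiff, hij⟩
    · exact Or.inr ⟨j, hj, hjd, hdiff, hij⟩
  · intro h i hi
    rcases h i hi with ⟨j, hj, hjd, hdiff, hij⟩ | ⟨j, hj, hjd, hdiff, hij⟩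
    · exact ⟨j, hj, 2, by omega, by omega, hjd, hdiff, by simpa using hij⟩
    · exact ⟨j, hj, 3, by omega, by omega, hjd, hdiff, by simpa using hij⟩

theorem D_iff (lst : List Int) : D_partial_sol lst ↔
    (lst.Nodup ∧
     (∀ i < lst.length - 1, |lst.getD i 0 - lst.getD (i + 1) 0| ≠ 1) ∧
     4 ≤ lst.length ∧
     ¬ ((∀ i < lst.length, pvECovA lst i) ↔ (∀ i < lst.length, pvECovB lst i))) := by
  unfold D_partial_sol
  rw [covAll_false, covAll_true]

-- the mark-table folds preserve length
theorem markFold_length (cond : Nat → Bool) (l : List Nat) (init : List Int) :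
    (l.foldl (fun tb ind =>
        if cond ind then (tb.set ind 1).set (ind + 2) 1 else tb) init).length
    = init.length := by
  induction l generalizing init with
  | nil => rfl
  | cons a t ih => simp only [List.foldl_cons]; rw [ih]; split <;> simp

-- characterisation of the mark tables: after folding range k, position j holds 1
-- iff it was marked from ind = j or from ind = j - 2 (marks land at ind and ind+2)
theorem markFold_getD (cond : Nat → Bool) (k n j : Nat) :
    ((List.range k).foldl (fun tb ind =>
        if cond ind then (tb.set ind 1).set (ind + 2) 1 else tb)
      (List.replicate n (0 : Int))).getD j 0
    = if (j < k ∧ j < n ∧ cond j = true) ∨ (2 ≤ j ∧ j - 2 < k ∧ j < n ∧ cond (j - 2) = true)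
      then 1 else 0 := by
  induction k with
  | zero =>
    simp only [List.range_zero, List.foldl_nil]
    rw [if_neg (by rintro (⟨h, _⟩ | ⟨_, h, _⟩) <;> omega)]
    rcases Nat.lt_or_ge j n with h | h
    · simp [List.getD, h]
    · rw [List.getD, List.getElem?_eq_none (l := List.replicate n (0 : Int)) (by simpa using h),
        Option.getD_none]
  | succ k ih =>
    rw [List.range_succ, List.foldl_append, List.foldl_cons, List.foldl_nil]
    have hlen := markFold_length cond (List.range k) (List.replicate n (0 : Int))
    simp only [List.length_replicate] at hlen
    by_cases hc : cond k = true
    · simp only [hc, if_true]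
      by_cases hjn : j < n
      · by_cases hj2 : j = k + 2
        · subst hj2
          rw [List.getD, List.getElem?_set_self (by rw [List.length_set, hlen]; omega),
            Option.getD_some]
          rw [if_pos (Or.inr ⟨by omega, by omega, hjn, by rw [show k + 2 - 2 = k by omega]; exact hc⟩)]
        · rw [List.getD, List.getElem?_set_ne (by omega)]
          by_cases hjk : j = k
          · subst hjk
            rw [List.getElem?_set_self (by rw [hlen]; omega), Option.getD_some]
            rw [if_pos (Or.inl ⟨by omega, hjn, hc⟩)]
          · rw [List.getElem?_set_ne (by omega), ← List.getD, ih]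
            congr 1
            simp only [eq_iff_iff]
            constructor
            · rintro (⟨h1, h2, h3⟩ | ⟨h1, h2, h3, h4⟩)
              · exact Or.inl ⟨by omega, h2, h3⟩
              · exact Or.inr ⟨h1, by omega, h3, h4⟩
            · rintro (⟨h1, h2, h3⟩ | ⟨h1, h2, h3, h4⟩)
              · exact Or.inl ⟨by omega, h2, h3⟩
              · exact Or.inr ⟨h1, by omega, h3, h4⟩
      · rw [List.getD, List.getElem?_eq_none (by simp only [List.length_set, hlen]; omega),
          Option.getD_none]
        rw [if_neg (by rintro (⟨_, h, _⟩ | ⟨_, _, h, _⟩) <;> omega)]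
    · rw [if_neg (by simp [hc]), ih]
      congr 1
      simp only [eq_iff_iff]
      constructor
      · rintro (⟨h1, h2, h3⟩ | ⟨h1, h2, h3, h4⟩)
        · exact Or.inl ⟨by omega, h2, h3⟩
        · exact Or.inr ⟨h1, by omega, h3, h4⟩
      · rintro (⟨h1, h2, h3⟩ | ⟨h1, h2, h3, h4⟩)
        · left
          refine ⟨?_, h2, h3⟩
          rcases Nat.lt_succ_iff_lt_or_eq.mp h1 with h | h
          · exact h
          · exact absurd h3 (by simp [h, hc])
        · right
          refine ⟨h1, ?_, h3, h4⟩
          rcases Nat.lt_succ_iff_lt_or_eq.mp h2 with h | h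
          · exact h
          · exact absurd h4 (by simp [h, hc])

-- A's nested duplicate loop detects exactly "not Nodup"
theorem dupScan_iff (lst : List Int) :
    ((List.range lst.length).any (fun ind =>
      (List.range' (ind + 1) (lst.length - (ind + 1))).any (fun ind2 =>
        lst.getD ind 0 == lst.getD ind2 0)) = true) ↔ ¬ lst.Nodup := by
  rw [List.nodup_iff_getElem?_ne_getElem?]
  simp only [List.any_eq_true, List.mem_range, List.mem_range', not_forall, not_not]
  constructor
  · rintro ⟨i, hi, j, ⟨c, hc, rfl⟩, hb⟩
    refine ⟨i, i + 1 + 1 * c, by omega, by omega, ?_⟩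
    rw [List.getElem?_eq_getElem hi, List.getElem?_eq_getElem (by omega)]
    simp only [Option.some_inj]
    have := (beq_iff_eq).mp hb
    rwa [List.getD_eq_getElem lst 0 hi, List.getD_eq_getElem lst 0 (by omega)] at this
  · rintro ⟨i, j, hij, hj, he⟩
    refine ⟨i, by omega, j, ⟨j - (i + 1), by omega, by omega⟩, ?_⟩
    rw [List.getElem?_eq_getElem (by omega), List.getElem?_eq_getElem hj] at he
    simp only [Option.some_inj] at he
    rw [List.getD_eq_getElem lst 0 (by omega), List.getD_eq_getElem lst 0 hj]
    exact beq_iff_eq.mpr he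

-- B's set-size test detects exactly "not Nodup"
theorem setSize_iff (lst : List Int) :
    (((PySem.Set.ofList lst).length != lst.length) = true) ↔ ¬ lst.Nodup := by
  rw [bne_iff_ne]
  constructor
  · intro h hnd
    exact h (by rw [PySem.Set.ofList_eq_self_of_nodup lst hnd])
  · intro hnd hlen
    have sp : List.Subperm (PySem.Set.ofList lst) lst :=
      (PySem.Set.nodup_ofList lst).subperm (fun x hx => (PySem.Set.mem_ofList lst x).mp hx)
    have p := sp.perm_of_length_le (le_of_eq hlen.symm)
    exact hnd (p.nodup_iff.mp (PySem.Set.nodup_ofList lst))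

-- the adjacent-difference scan detects exactly the negation of D_'s second conjunct
theorem adjScan_iff (lst : List Int) :
    (((List.range (lst.length - 1)).any (fun ind =>
        |lst.getD ind 0 - lst.getD (ind + 1) 0| == 1)) = true)
    ↔ ¬ (∀ i < lst.length - 1, |lst.getD i 0 - lst.getD (i + 1) 0| ≠ 1) := by
  simp only [List.any_eq_true, List.mem_range, beq_iff_eq, not_forall, not_not]
  constructor
  · rintro ⟨i, hi, he⟩; exact ⟨i, hi, he⟩
  · rintro ⟨i, hi, he⟩; exact ⟨i, hi, he⟩

-- A's final per-index test decides exactly pvECovA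
theorem uncovA_eq (lst : List Int) (i : Nat) (hi : i < lst.length) :
    (!( ((List.range (lst.length - 3)).foldl (fun tb ind =>
          if |lst.getD ind 0 - lst.getD (ind + 3) 0| == 1 then
            (tb.set ind 1).set (ind + 2) 1 else tb)
          (List.replicate lst.length (0 : Int))).getD i 0 == 0
      && ((List.range (lst.length - 2)).foldl (fun ob ind =>
          if |lst.getD ind 0 - lst.getD (ind + 2) 0| == 1 then
            (ob.set ind 1).set (ind + 2) 1 else ob)
          (List.replicate lst.length (0 : Int))).getD i 0 == 0))
    = decide (pvECovA lst i) := by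
  rw [markFold_getD (fun ind => |lst.getD ind 0 - lst.getD (ind + 3) 0| == 1),
      markFold_getD (fun ind => |lst.getD ind 0 - lst.getD (ind + 2) 0| == 1)]
  have e : ∀ (P : Prop) [Decidable P], ((if P then (1 : Int) else 0) == 0) = !decide P := by
    intro P _; by_cases h : P <;> simp [h]
  rw [e, e, Bool.not_and, Bool.not_not, Bool.not_not]
  rw [show ∀ a b : Bool, (a = b) ↔ ((a = true) ↔ (b = true)) from
    fun a b => by cases a <;> cases b <;> simp]
  simp only [Bool.or_eq_true, decide_eq_true_eq, beq_iff_eq]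
  unfold pvECovA
  constructor
  · rintro (h | h)
    · rcases h with ⟨h1, h2, h3⟩ | ⟨h1, h2, h3, hcc⟩
      · exact Or.inr ⟨i, hi, by omega, h3, Or.inl rfl⟩
      · exact Or.inr ⟨i - 2, by omega, by omega, hcc, Or.inr (by omega)⟩
    · rcases h with ⟨h1, h2, h3⟩ | ⟨h1, h2, h3, hcc⟩
      · exact Or.inl ⟨i, hi, by omega, h3, Or.inl rfl⟩
      · exact Or.inl ⟨i - 2, by omega, by omega, hcc, Or.inr (by omega)⟩
  · rintro (⟨j, hj, hj2, hd, hij | hij⟩ | ⟨j, hj, hj3, hd, hij | hij⟩)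
    · subst hij; exact Or.inr (Or.inl ⟨by omega, hi, hd⟩)
    · subst hij
      exact Or.inr (Or.inr ⟨by omega, by omega, hi, by rw [show j + 2 - 2 = j by omega]; exact hd⟩)
    · subst hij; exact Or.inl (Or.inl ⟨by omega, hi, hd⟩)
    · subst hij
      exact Or.inl (Or.inr ⟨by omega, by omega, hi, by rw [show j + 2 - 2 = j by omega]; exact hd⟩)

-- B's per-index test decides exactly pvECovB
theorem covB_eq (lst : List Int) (i : Nat) (hi : i < lst.length) :
    pvCovered lst lst.length i = decide (pvECovB lst i) := by
  unfold pvCovered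
  rw [show ∀ a b : Bool, (a = b) ↔ ((a = true) ↔ (b = true)) from
    fun a b => by cases a <;> cases b <;> simp]
  simp only [Bool.or_eq_true, Bool.and_eq_true, decide_eq_true_eq, beq_iff_eq]
  unfold pvECovB
  constructor
  · rintro (((⟨h1, h2⟩ | ⟨h1, h2⟩) | ⟨h1, h2⟩) | ⟨h1, h2⟩)
    · exact Or.inl ⟨i, hi, h1, h2, Or.inl rfl⟩
    · exact Or.inl ⟨i - 2, by omega, by omega, by rwa [show i - 2 + 2 = i by omega], Or.inr (by omega)⟩
    · exact Or.inr ⟨i, hi, h1, h2, Or.inl rfl⟩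
    · exact Or.inr ⟨i - 3, by omega, by omega, by rwa [show i - 3 + 3 = i by omega], Or.inr (by omega)⟩
  · rintro (⟨j, hj, hj2, hd, hij | hij⟩ | ⟨j, hj, hj3, hd, hij | hij⟩)
    · subst hij; exact Or.inl (Or.inl (Or.inl ⟨hj2, hd⟩))
    · subst hij
      exact Or.inl (Or.inl (Or.inr ⟨by omega, by rwa [show j + 2 - 2 = j by omega]⟩))
    · subst hij; exact Or.inl (Or.inr ⟨hj3, hd⟩)
    · subst hij; exact Or.inr ⟨by omega, by rwa [show j + 3 - 3 = j by omega]⟩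

-- any-over-range of a pointwise-negated decide is the negated bounded forall
theorem anyNot_eq (n : Nat) (f : Nat → Bool) (P : Nat → Prop) [DecidablePred P]
    (h : ∀ i < n, f i = !decide (P i)) :
    ((List.range n).any f) = !decide (∀ i < n, P i) := by
  rcases Bool.eq_false_or_eq_true ((List.range n).any f) with ha | ha
  · obtain ⟨i, hmem, hf⟩ := List.any_eq_true.mp ha
    have hi := List.mem_range.mp hmem
    rw [h i hi] at hf
    have hni : ¬ P i := by simpa using hf
    rw [ha, decide_eq_false (fun hall => hni (hall i hi))]
    rfl
  · have hP : ∀ i < n, P i := fun i hi => by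
      have hfi := List.any_eq_false.mp ha i (List.mem_range.mpr hi)
      rw [h i hi] at hfi
      simpa using hfi
    rw [ha, decide_eq_true hP]
    rfl

-- canonical form of A's result
theorem resultA (lst : List Int) :
    partial_sol lst =
      (decide lst.Nodup
       && decide (∀ i < lst.length - 1, |lst.getD i 0 - lst.getD (i + 1) 0| ≠ 1)
       && (decide (lst.length < 4) || decide (∀ i < lst.length, pvECovA lst i))) := by
  unfold partial_sol
  by_cases hnd : lst.Nodup
  · rw [if_neg (fun h => (dupScan_iff lst).mp h hnd)]
    by_cases hadj : ∀ i < lst.length - 1, |lst.getD i 0 - lst.getD (i + 1) 0| ≠ 1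
    · rw [if_neg (fun h => (adjScan_iff lst).mp h hadj)]
      rw [decide_eq_true hnd, decide_eq_true hadj]
      by_cases h4 : lst.length < 4
      · rw [if_pos h4, decide_eq_true h4]
        simp
      · rw [if_neg h4, decide_eq_false h4]
        simp only [Bool.true_and, Bool.false_or]
        rw [anyNot_eq lst.length _ (fun i => pvECovA lst i)
            (fun i hi => by rw [← uncovA_eq lst i hi, Bool.not_not])]
        rcases Bool.eq_false_or_eq_true (decide (∀ i < lst.length, pvECovA lst i)) with h | h
        · rw [h]; rfl
        · rw [h]; rfl
    · rw [if_pos ((adjScan_iff lst).mpr hadj), decide_eq_false hadj]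
      simp
  · rw [if_pos ((dupScan_iff lst).mpr hnd), decide_eq_false hnd]
    simp

-- canonical form of B's result
theorem resultB (lst : List Int) :
    partial_sol_alt lst =
      (decide lst.Nodup
       && decide (∀ i < lst.length - 1, |lst.getD i 0 - lst.getD (i + 1) 0| ≠ 1)
       && (decide (lst.length < 4) || decide (∀ i < lst.length, pvECovB lst i))) := by
  unfold partial_sol_alt
  by_cases hnd : lst.Nodup
  · rw [if_neg (fun h => (setSize_iff lst).mp h hnd)]
    by_cases hadj : ∀ i < lst.length - 1, |lst.getD i 0 - lst.getD (i + 1) 0| ≠ 1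
    · rw [if_neg (fun h => (adjScan_iff lst).mp h hadj)]
      rw [decide_eq_true hnd, decide_eq_true hadj]
      by_cases h4 : lst.length < 4
      · rw [if_pos h4, decide_eq_true h4]
        simp
      · rw [if_neg h4, decide_eq_false h4]
        simp only [Bool.true_and, Bool.false_or]
        rw [List.all_eq_not_any_not,
          anyNot_eq lst.length _ (fun i => pvECovB lst i)
            (fun i hi => by rw [covB_eq lst i hi]), Bool.not_not]
    · rw [if_pos ((adjScan_iff lst).mpr hadj), decide_eq_false hadj]
      simp
  · rw [if_pos ((setSize_iff lst).mpr hnd), decide_eq_false hnd]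
    simp

-- ===== VERDICT (by name: the statements are the Claim_ definitions above) =====
theorem partial_sol_spec : Claim_unchanged_partial_sol := by
  intro lst _ hnd
  rw [resultA, resultB]
  by_cases h1 : lst.Nodup
  · by_cases h2 : ∀ i < lst.length - 1, |lst.getD i 0 - lst.getD (i + 1) 0| ≠ 1
    · by_cases h3 : lst.length < 4
      · rw [decide_eq_true h3]
        simp
      · have hiff : (∀ i < lst.length, pvECovA lst i) ↔ (∀ i < lst.length, pvECovB lst i) := by
          by_contra hc
          exact hnd ((D_iff lst).mpr ⟨h1, h2, by omega, hc⟩)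
        rw [decide_eq_decide.mpr hiff]
    · rw [decide_eq_false h2]
      simp
  · rw [decide_eq_false h1]
    simp

theorem partial_sol_changed : Claim_changed_partial_sol := by
  unfold Claim_changed_partial_sol; decide

theorem partial_sol_tight : Claim_exact_partial_sol := by
  intro lst _ hd
  obtain ⟨h1, h2, h3, hne⟩ := (D_iff lst).mp hd
  rw [resultA, resultB]
  rw [decide_eq_true h1, decide_eq_true h2,
    decide_eq_false (show ¬ lst.length < 4 from by omega)]
  simp only [Bool.true_and, Bool.false_or]
  intro he
  exact hne (decide_eq_decide.mp he)
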